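-- pv_equiv track=rewrite | github.com/v-techie-trader/CprSignals | bot.py | prepare_list
-- ===== SOURCE A (Python) =====
-- from itertools import zip_longest
--
-- def prepare_list(name, script_list, watchlist="", message=""):
--
--     zips = zip_longest(*[iter(script_list)] * 2)
--     text=f"|---{name}"
--     watch=f"###{name},"
--     for symbol1, symbol2 in zips:
--         symbol1_=f"BINANCE:{symbol1}PERP"
--         chart_link1= f"https://in.tradingview.com/chart?symbol={symbol1_}"
--         text+=f"\n|------ <a href='{chart_link1}'>{symbol1:<10}</a>"
--         # text+=f"\n|------ <i>{symbol1:<10}</i>"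
--         watch+=f"{symbol1_},"
--         if(symbol2):
--             symbol2_=f"BINANCE:{symbol2}PERP"
--             chart_link2= f"https://in.tradingview.com/chart?symbol={symbol2_}"
--             text+=f"|  <a href='{chart_link2}'>{symbol2:<10}</a>"
--             # text+=f"|  <i>{symbol2:<10}</i>"
--             watch+=f"{symbol2_},"
--     text+="\n|\n"
--     return watchlist+watch, message+text
-- ===== SOURCE B (Python) =====
-- def prepare_list(name, script_list, watchlist="", message=""):
--     text = f"|---{name}"
--     watch = f"###{name},"
--     for i, symbol in enumerate(script_list):
--         symbol_ = f"BINANCE:{symbol}PERP"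
--         chart_link = f"https://in.tradingview.com/chart?symbol={symbol_}"
--         if i % 2 == 0:
--             text += f"\n|------ <a href='{chart_link}'>{symbol:<10}</a>"
--             watch += f"{symbol_},"
--         elif symbol:
--             text += f"|  <a href='{chart_link}'>{symbol:<10}</a>"
--             watch += f"{symbol_},"
--     text += "\n|\n"
--     return watchlist + watch, message + text
-- ===== Notes on version B (the rewrite author's own statement) =====
-- stated objective: idiomatic
-- what changed: Replaces the zip_longest(*[iter(..)]*2) pairing trick with a flat enumerate loop that picks the fragment by index parity, removing the pair construction and the None padding case.
import Mathlib
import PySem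

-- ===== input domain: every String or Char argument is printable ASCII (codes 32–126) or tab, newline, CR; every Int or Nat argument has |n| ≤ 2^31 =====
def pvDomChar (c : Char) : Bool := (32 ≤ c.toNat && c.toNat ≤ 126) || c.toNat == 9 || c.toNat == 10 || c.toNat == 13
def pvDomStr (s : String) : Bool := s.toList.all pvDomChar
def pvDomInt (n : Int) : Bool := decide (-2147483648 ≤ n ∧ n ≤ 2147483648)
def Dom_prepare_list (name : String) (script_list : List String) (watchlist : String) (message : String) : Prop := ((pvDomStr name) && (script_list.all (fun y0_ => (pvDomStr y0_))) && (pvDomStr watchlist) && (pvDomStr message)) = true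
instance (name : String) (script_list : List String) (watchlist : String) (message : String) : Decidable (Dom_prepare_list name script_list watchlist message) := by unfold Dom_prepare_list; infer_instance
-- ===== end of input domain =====

-- B drops zip_longest pairing and iterates the list flat with enumerate, choosing the fragment by index parity (objective: more idiomatic, same cost).

-- f"{s:<10}"  (left-justify to width 10 in characters; exact on ASCII)
def pvLjust10 (s : String) : String := s ++ String.ofList (List.replicate (10 - s.toList.length) ' ')

-- ===== PORT A =====
-- zip_longest(*[iter(script_list)]*2): consecutive pairs, odd tail padded with None
def pvPairs : List String → List (String × Option String)
  | [] => []
  | [a] => [(a, none)]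
  | a :: b :: rest => (a, some b) :: pvPairs rest

-- the for-loop over zips, state (text, watch)
def pvLoopA : List (String × Option String) → String → String → String × String
  | [], text, watch => (text, watch)
  | (s1, os2) :: rest, text, watch =>
    let s1_ := "BINANCE:" ++ s1 ++ "PERP"
    let link1 := "https://in.tradingview.com/chart?symbol=" ++ s1_
    let text := text ++ "\n|------ <a href='" ++ link1 ++ "'>" ++ pvLjust10 s1 ++ "</a>"
    let watch := watch ++ s1_ ++ ","
    match os2 with
    | some s2 =>
      if s2 ≠ "" then
        let s2_ := "BINANCE:" ++ s2 ++ "PERP"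
        let link2 := "https://in.tradingview.com/chart?symbol=" ++ s2_
        pvLoopA rest (text ++ "|  <a href='" ++ link2 ++ "'>" ++ pvLjust10 s2 ++ "</a>") (watch ++ s2_ ++ ",")
      else pvLoopA rest text watch
    | none => pvLoopA rest text watch

def prepare_list (name : String) (script_list : List String) (watchlist : String) (message : String) : String × String :=
  let (text, watch) := pvLoopA (pvPairs script_list) ("|---" ++ name) ("###" ++ name ++ ",")
  (watchlist ++ watch, message ++ text ++ "\n|\n")

-- ===== PORT B =====
-- the for-loop 'for i, symbol in enumerate(script_list)', state (text, watch)
def pvLoopB : Nat → List String → String → String → String × String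
  | _, [], text, watch => (text, watch)
  | i, s :: rest, text, watch =>
    let s_ := "BINANCE:" ++ s ++ "PERP"
    let link := "https://in.tradingview.com/chart?symbol=" ++ s_
    if i % 2 = 0 then
      pvLoopB (i + 1) rest (text ++ "\n|------ <a href='" ++ link ++ "'>" ++ pvLjust10 s ++ "</a>") (watch ++ s_ ++ ",")
    else if s ≠ "" then
      pvLoopB (i + 1) rest (text ++ "|  <a href='" ++ link ++ "'>" ++ pvLjust10 s ++ "</a>") (watch ++ s_ ++ ",")
    else pvLoopB (i + 1) rest text watch

def prepare_list_alt (name : String) (script_list : List String) (watchlist : String) (message : String) : String × String :=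
  let (text, watch) := pvLoopB 0 script_list ("|---" ++ name) ("###" ++ name ++ ",")
  (watchlist ++ watch, message ++ text ++ "\n|\n")

-- ===== PRECONDITION & SPEC =====
def Spec_prepare_list (name : String) (script_list : List String) (watchlist : String) (message : String) (out : String × String) : Prop := out = prepare_list_alt name script_list watchlist message
instance (name : String) (script_list : List String) (watchlist : String) (message : String) (out : String × String) : Decidable (Spec_prepare_list name script_list watchlist message out) := by unfold Spec_prepare_list; infer_instance

-- ===== CLAIM (what is proved, stated in full; the proofs are below) =====
def Claim_equal_prepare_list : Prop := ∀ (name : String) (script_list : List String) (watchlist : String) (message : String), Dom_prepare_list name script_list watchlist message → Spec_prepare_list name script_list watchlist message (prepare_list name script_list watchlist message)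

-- ===== LEMMAS AND PROOFS =====
theorem pvLoop_eq (xs : List String) : ∀ (i : Nat), i % 2 = 0 → ∀ (text watch : String),
    pvLoopA (pvPairs xs) text watch = pvLoopB i xs text watch := by
  induction xs using pvPairs.induct with
  | case1 => intro i _ t w; simp [pvPairs, pvLoopA, pvLoopB]
  | case2 a => intro i hi t w; simp [pvPairs, pvLoopA, pvLoopB, hi]
  | case3 a b rest ih =>
    intro i hi t w
    have h1 : (i + 1) % 2 ≠ 0 := by omega
    have h2 : (i + 2) % 2 = 0 := by omega
    simp only [pvPairs, pvLoopA, pvLoopB, hi, h1]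
    by_cases hb : b = "" <;> simp [hb, ih (i + 2) h2]

-- ===== VERDICT (by name: the statement is the Claim_ definition above) =====
theorem prepare_list_spec : Claim_equal_prepare_list := by
  intro name sl w m _
  unfold Spec_prepare_list prepare_list prepare_list_alt
  rw [pvLoop_eq sl 0 rfl]
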